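-- pv_equiv track=rewrite | github.com/lucasmedrano/RedSocial | red_social.py | obtener_comando
-- ===== SOURCE A (Python) =====
-- def obtener_comando(cadena):
--     comando = ""
--     parametro1 = ""
--     parametro2 = ""
--     espacios = 0
--     comas = 0
--     for posicion, letra in enumerate(cadena):
--         if letra != ' ' and espacios == 0: comando += letra
--         elif espacios == 0 and letra == ' ': espacios = 1
--         else:
--             if(comas == 0 and letra != ','): parametro1 += letra
--             elif(comas == 1 and letra != ','): parametro2 += letra
--             elif letra == ',': comas += 1
--     return (comando, parametro1, parametro2.lstrip())
-- ===== SOURCE B (Python) =====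
-- def obtener_comando(cadena):
--     comando, _, resto = cadena.partition(' ')
--     parametro1, _, resto2 = resto.partition(',')
--     parametro2 = resto2.partition(',')[0]
--     return (comando, parametro1, parametro2.lstrip())
-- ===== Notes on version B (the rewrite author's own statement) =====
-- stated objective: simpler
-- what changed: Replaced the char-by-char state machine with espacios/comas flags by three str.partition cuts: split off the command at the first space, parameter 1 at the first comma, parameter 2 at the next comma, then lstrip parameter 2.
import Mathlib
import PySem

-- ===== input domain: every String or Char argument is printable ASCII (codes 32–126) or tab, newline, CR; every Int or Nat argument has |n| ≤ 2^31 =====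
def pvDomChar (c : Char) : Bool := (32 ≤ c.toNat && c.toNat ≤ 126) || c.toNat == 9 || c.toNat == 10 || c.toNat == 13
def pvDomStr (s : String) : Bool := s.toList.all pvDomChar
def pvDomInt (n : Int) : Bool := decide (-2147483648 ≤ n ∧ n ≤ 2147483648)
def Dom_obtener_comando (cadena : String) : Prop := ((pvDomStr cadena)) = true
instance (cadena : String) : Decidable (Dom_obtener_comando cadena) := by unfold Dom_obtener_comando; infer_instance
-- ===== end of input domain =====

-- B replaces A's char-by-char state machine (espacios/comas flags) with three str.partition cuts; objective: simpler.

-- ===== PORT A =====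
-- the loop body of A, one step per character (letra)
def pvStepA (st : List Char × List Char × List Char × Int × Int) (letra : Char) :
    List Char × List Char × List Char × Int × Int :=
  match st with
  | (comando, parametro1, parametro2, espacios, comas) =>
    if letra ≠ ' ' ∧ espacios = 0 then (comando ++ [letra], parametro1, parametro2, espacios, comas)
    else if espacios = 0 ∧ letra = ' ' then (comando, parametro1, parametro2, 1, comas)
    else if comas = 0 ∧ letra ≠ ',' then (comando, parametro1 ++ [letra], parametro2, espacios, comas)
    else if comas = 1 ∧ letra ≠ ',' then (comando, parametro1, parametro2 ++ [letra], espacios, comas)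
    else if letra = ',' then (comando, parametro1, parametro2, espacios, comas + 1)
    else (comando, parametro1, parametro2, espacios, comas)

def obtener_comando (cadena : String) : String × String × String :=
  let fin := (PySem.List.enumerate cadena.toList 0).foldl
      (fun st pe => pvStepA st pe.2) ([], [], [], 0, 0)
  (String.ofList fin.1, String.ofList fin.2.1, String.ofList (PySem.Chars.lstrip fin.2.2.1))

-- ===== PORT B =====
-- hand port of Python str.partition(sep) for a ONE-character sep (exact there): returns
-- (part before sep, part after sep); after = [] when sep is absent, like partition's ('', '')
def pvPartition1 (cs : List Char) (c : Char) : List Char × List Char :=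
  if c ∈ cs then (cs.takeWhile (· ≠ c), (cs.dropWhile (· ≠ c)).drop 1)
  else (cs, [])

def obtener_comando_alt (cadena : String) : String × String × String :=
  let pr := pvPartition1 cadena.toList ' '
  let pr2 := pvPartition1 pr.2 ','
  let parametro2 := (pvPartition1 pr2.2 ',').1
  (String.ofList pr.1, String.ofList pr2.1, String.ofList (PySem.Chars.lstrip parametro2))

-- ===== PRECONDITION & SPEC =====
def Spec_obtener_comando (cadena : String) (out : String × String × String) : Prop := out = obtener_comando_alt cadena
instance (cadena : String) (out : String × String × String) : Decidable (Spec_obtener_comando cadena out) := by unfold Spec_obtener_comando; infer_instance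

-- ===== CLAIM (what is proved, stated in full; the proofs are below) =====
def Claim_equal_obtener_comando : Prop := ∀ (cadena : String), Dom_obtener_comando cadena → Spec_obtener_comando cadena (obtener_comando cadena)

-- ===== LEMMAS AND PROOFS =====

-- A's fold over enumerate ignores the position, so it is a fold over the characters
theorem pv_foldl_enumerate (xs : List Char) (n : Int)
    (st : List Char × List Char × List Char × Int × Int) :
    (PySem.List.enumerate xs n).foldl (fun s pe => pvStepA s pe.2) st = xs.foldl pvStepA st := by
  induction xs generalizing n st with
  | nil => simp [PySem.List.enumerate_nil]
  | cons x t ih => simp [PySem.List.enumerate_cons, ih]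

-- after the second comma (espacios = 1, comas ≥ 2) the three output fields never change
theorem pv_loop2 (cs : List Char) (c p1 p2 : List Char) (m : Int) (hm : 2 ≤ m) :
    (cs.foldl pvStepA (c, p1, p2, 1, m)).1 = c ∧
    (cs.foldl pvStepA (c, p1, p2, 1, m)).2.1 = p1 ∧
    (cs.foldl pvStepA (c, p1, p2, 1, m)).2.2.1 = p2 := by
  induction cs generalizing m with
  | nil => exact ⟨rfl, rfl, rfl⟩
  | cons x t ih =>
    have hm0 : ¬ (m = 0) := by omega
    have hm1 : ¬ (m = 1) := by omega
    by_cases hx : x = ','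
    · rw [List.foldl_cons, show pvStepA (c, p1, p2, 1, m) x = (c, p1, p2, 1, m + 1) from by
        simp [pvStepA, hx, hm0, hm1]]
      exact ih (m + 1) (by omega)
    · rw [List.foldl_cons, show pvStepA (c, p1, p2, 1, m) x = (c, p1, p2, 1, m) from by
        simp [pvStepA, hx, hm0, hm1]]
      exact ih m hm

-- between the first and second comma (comas = 1): parametro2 collects up to the next comma
theorem pv_loop1 (cs : List Char) (c p1 p2 : List Char) :
    (cs.foldl pvStepA (c, p1, p2, 1, 1)).1 = c ∧
    (cs.foldl pvStepA (c, p1, p2, 1, 1)).2.1 = p1 ∧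
    (cs.foldl pvStepA (c, p1, p2, 1, 1)).2.2.1 = p2 ++ cs.takeWhile (· ≠ ',') := by
  induction cs generalizing p2 with
  | nil => exact ⟨rfl, rfl, by simp⟩
  | cons x t ih =>
    by_cases hx : x = ','
    · rw [List.foldl_cons, show pvStepA (c, p1, p2, 1, 1) x = (c, p1, p2, 1, 2) from by
        simp [pvStepA, hx]]
      have h2 := pv_loop2 t c p1 p2 2 (by omega)
      exact ⟨h2.1, h2.2.1, by rw [h2.2.2]; simp [hx]⟩
    · rw [List.foldl_cons, show pvStepA (c, p1, p2, 1, 1) x = (c, p1, p2 ++ [x], 1, 1) from by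
        simp [pvStepA, hx]]
      have ih' := ih (p2 ++ [x])
      exact ⟨ih'.1, ih'.2.1, by rw [ih'.2.2]; simp [hx]⟩

-- after the first space, before any comma (comas = 0, parametro2 still empty)
theorem pv_loop0 (cs : List Char) (c p1 : List Char) :
    (cs.foldl pvStepA (c, p1, [], 1, 0)).1 = c ∧
    (cs.foldl pvStepA (c, p1, [], 1, 0)).2.1 = p1 ++ cs.takeWhile (· ≠ ',') ∧
    (cs.foldl pvStepA (c, p1, [], 1, 0)).2.2.1 =
      ((cs.dropWhile (· ≠ ',')).drop 1).takeWhile (· ≠ ',') := by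
  induction cs generalizing p1 with
  | nil => exact ⟨rfl, by simp, by simp⟩
  | cons x t ih =>
    by_cases hx : x = ','
    · rw [List.foldl_cons, show pvStepA (c, p1, [], 1, 0) x = (c, p1, [], 1, 1) from by
        simp [pvStepA, hx]]
      have h1 := pv_loop1 t c p1 []
      refine ⟨h1.1, ?_, ?_⟩
      · rw [h1.2.1]; simp [hx]
      · rw [h1.2.2]; simp [hx]
    · rw [List.foldl_cons, show pvStepA (c, p1, [], 1, 0) x = (c, p1 ++ [x], [], 1, 0) from by
        simp [pvStepA, hx]]
      have ih' := ih (p1 ++ [x])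
      refine ⟨ih'.1, ?_, ?_⟩
      · rw [ih'.2.1]; simp [hx]
      · rw [ih'.2.2]; simp [hx]

-- the full loop from the initial state: comando up to the first space, then pv_loop0
theorem pv_loopS (cs : List Char) (c : List Char) :
    (cs.foldl pvStepA (c, [], [], 0, 0)).1 = c ++ cs.takeWhile (· ≠ ' ') ∧
    (cs.foldl pvStepA (c, [], [], 0, 0)).2.1 =
      ((cs.dropWhile (· ≠ ' ')).drop 1).takeWhile (· ≠ ',') ∧
    (cs.foldl pvStepA (c, [], [], 0, 0)).2.2.1 =
      (((((cs.dropWhile (· ≠ ' ')).drop 1).dropWhile (· ≠ ',')).drop 1).takeWhile (· ≠ ',')) := by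
  induction cs generalizing c with
  | nil => exact ⟨by simp, by simp, by simp⟩
  | cons x t ih =>
    by_cases hx : x = ' '
    · rw [List.foldl_cons, show pvStepA (c, [], [], 0, 0) x = (c, [], [], 1, 0) from by
        simp [pvStepA, hx]]
      have h0 := pv_loop0 t c []
      refine ⟨?_, ?_, ?_⟩
      · rw [h0.1]; simp [hx]
      · rw [h0.2.1]; simp [hx]
      · rw [h0.2.2]; simp [hx]
    · rw [List.foldl_cons, show pvStepA (c, [], [], 0, 0) x = (c ++ [x], [], [], 0, 0) from by
        simp [pvStepA, hx]]
      have ih' := ih (c ++ [x])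
      refine ⟨?_, ?_, ?_⟩
      · rw [ih'.1]; simp [hx]
      · rw [ih'.2.1]; simp [hx]
      · rw [ih'.2.2]; simp [hx]

-- pvPartition1 in takeWhile/dropWhile normal form (both membership cases collapse)
theorem pvPartition1_fst (cs : List Char) (c : Char) :
    (pvPartition1 cs c).1 = cs.takeWhile (· ≠ c) := by
  unfold pvPartition1
  split_ifs with h
  · rfl
  · exact (List.takeWhile_eq_self_iff.mpr (fun x hx => by
      simp; exact fun he => h (he ▸ hx))).symm

theorem pvPartition1_snd (cs : List Char) (c : Char) :
    (pvPartition1 cs c).2 = (cs.dropWhile (· ≠ c)).drop 1 := by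
  unfold pvPartition1
  split_ifs with h
  · rfl
  · have hd : cs.dropWhile (· ≠ c) = [] := List.dropWhile_eq_nil_iff.mpr (fun x hx => by
      simp; exact fun he => h (he ▸ hx))
    rw [hd]; rfl

-- ===== VERDICT (by name: the statement is the Claim_ definition above) =====
theorem obtener_comando_spec : Claim_equal_obtener_comando := by
  intro cadena _
  unfold Spec_obtener_comando obtener_comando obtener_comando_alt
  rw [pv_foldl_enumerate]
  have hS := pv_loopS cadena.toList []
  simp only [pvPartition1_fst, pvPartition1_snd]
  rw [hS.1, hS.2.1, hS.2.2]
  simp
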